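-- pv_equiv track=rewrite | github.com/rhks13/Algorithm | 프로그래머스/lv0/120956. 옹알이 （1）/옹알이 （1）.py | solution
-- ===== SOURCE A (Python) =====
-- def solution(babbling):
--     bab = ["aya", "ye", "woo", "ma"]
--     bab_list = bab.copy()
--     answer = 0
--         #단어 두개의 조합
--     for i in range(4):
--         for j in range(4):
--             if i==j:
--                 continue
--             bab_list.append(bab[i]+bab[j])
--     #단어 세개 조합
--     num_list = [1,2,3,4]
--
--     for i in range(4):
--         for j in range(4):
--             for k in range(4):
--                 if ((i==j)or(i==k)or(j==k)):
--                     continue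
--                 bab_list.append(bab[i]+bab[j]+bab[k])
--     #단어 네개 조합
--     for i in range(4):
--         for j in range(4):
--             for k in range(4):
--                 for l in range(4):
--                     if ((i==j)or(i==k)or(j==k)or(i==l)or(k==l)or(j==l)):
--                         continue
--                     bab_list.append(bab[i]+bab[j]+bab[k]+bab[l])
--
--     for i in range(len(babbling)):
--         if babbling[i] in bab_list:
--             answer = answer+1
--     return answer
-- ===== SOURCE B (Python) =====
-- SOUNDS = ["aya", "ye", "woo", "ma"]
--
-- def solution(babbling):
--     # Backtracking segmentation: a word counts iff it splits into sounds,
--     # each used at most once (and the word is non-empty).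
--     def ok(s, used):
--         if not s:
--             return len(used) > 0
--         return any(
--             i not in used and s.startswith(w) and ok(s[len(w):], used | {i})
--             for i, w in enumerate(SOUNDS)
--         )
--     return sum(1 for word in babbling if ok(word, frozenset()))
-- ===== Notes on version B (the rewrite author's own statement) =====
-- stated objective: alternative
-- what changed: A precomputes all 64 ordered concatenations of 1-4 distinct sounds with four nested index loops and tests list membership; B does a recursive backtracking segmentation of each word, consuming one unused sound prefix at a time, with no precomputed table.
import Mathlib
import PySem

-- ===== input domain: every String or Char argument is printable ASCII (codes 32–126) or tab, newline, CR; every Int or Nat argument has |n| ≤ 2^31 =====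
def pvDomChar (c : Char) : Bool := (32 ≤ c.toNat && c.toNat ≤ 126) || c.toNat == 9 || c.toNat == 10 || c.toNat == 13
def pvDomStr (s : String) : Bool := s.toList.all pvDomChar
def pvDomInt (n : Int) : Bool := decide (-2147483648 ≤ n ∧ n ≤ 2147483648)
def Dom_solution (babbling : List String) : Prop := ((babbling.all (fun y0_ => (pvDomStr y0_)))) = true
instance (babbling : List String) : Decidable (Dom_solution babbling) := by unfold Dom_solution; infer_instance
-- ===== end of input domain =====

-- B replaces A's precomputed table of all 64 ordered concatenations of 1–4 distinct
-- sounds (four nested index loops + list membership) by a recursive backtracking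
-- segmentation of each word; objective: alternative algorithm, similar cost.

-- ===== PORT A =====
-- A's input-independent table bab_list, built exactly by A's loops (factored out as a helper).
def pvBab : List String := ["aya", "ye", "woo", "ma"]

def pvBabList : List String :=
  let bab := pvBab
  let babList := bab       -- bab.copy()
  -- pairs
  let babList := (PySem.List.pyRange 0 4 1).foldl (fun bl i =>
    (PySem.List.pyRange 0 4 1).foldl (fun bl j =>
      if i = j then bl
      else bl ++ [PySem.List.pyGetD bab i "" ++ PySem.List.pyGetD bab j ""]) bl) babList
  -- triples
  let babList := (PySem.List.pyRange 0 4 1).foldl (fun bl i =>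
    (PySem.List.pyRange 0 4 1).foldl (fun bl j =>
      (PySem.List.pyRange 0 4 1).foldl (fun bl k =>
        if i = j ∨ i = k ∨ j = k then bl
        else bl ++ [PySem.List.pyGetD bab i "" ++ PySem.List.pyGetD bab j ""
                      ++ PySem.List.pyGetD bab k ""]) bl) bl) babList
  -- quadruples
  let babList := (PySem.List.pyRange 0 4 1).foldl (fun bl i =>
    (PySem.List.pyRange 0 4 1).foldl (fun bl j =>
      (PySem.List.pyRange 0 4 1).foldl (fun bl k =>
        (PySem.List.pyRange 0 4 1).foldl (fun bl l =>
          if i = j ∨ i = k ∨ j = k ∨ i = l ∨ k = l ∨ j = l then bl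
          else bl ++ [PySem.List.pyGetD bab i "" ++ PySem.List.pyGetD bab j ""
                        ++ PySem.List.pyGetD bab k "" ++ PySem.List.pyGetD bab l ""]) bl) bl) bl) babList
  babList

def solution (babbling : List String) : Int :=
  let answer : Int := 0
  let _numList : List Int := [1, 2, 3, 4]   -- unused in A as well
  (PySem.List.pyRange 0 (babbling.length : Int) 1).foldl
    (fun acc i => if PySem.List.pyGetD babbling i "" ∈ pvBabList then acc + 1 else acc) answer

-- ===== PORT B =====
def pvSounds : List String := ["aya", "ye", "woo", "ma"]

-- ok(s, used) of Source B; fuel = |s| bounds the recursion depth (each step consumes a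
-- non-empty prefix, so fuel never runs out on the calls solution_alt makes).
def okB (fuel : Nat) (s : List Char) (used : List Nat) : Bool :=
  match fuel, s with
  | _, [] => decide (0 < used.length)
  | 0, _ :: _ => false
  | fuel + 1, s =>
    ((pvSounds.map String.toList).zipIdx).any (fun wi =>
      decide (wi.2 ∉ used) && wi.1.isPrefixOf s && okB fuel (s.drop wi.1.length) (wi.2 :: used))

def solution_alt (babbling : List String) : Int :=
  ((babbling.countP (fun w => okB w.toList.length w.toList [])) : Int)

-- ===== PRECONDITION & SPEC =====
def Spec_solution (babbling : List String) (out : Int) : Prop := out = solution_alt babbling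
instance (babbling : List String) (out : Int) : Decidable (Spec_solution babbling out) := by unfold Spec_solution; infer_instance

-- ===== CLAIM (what is proved, stated in full; the proofs are below) =====
def Claim_equal_solution : Prop := ∀ (babbling : List String), Dom_solution babbling → Spec_solution babbling (solution babbling)

-- ===== LEMMAS AND PROOFS =====

-- All concatenations of at most n distinct sounds whose indices avoid `used`
-- (the empty concatenation included).
def pvStrs : Nat → List Nat → List (List Char)
  | 0, _ => [[]]
  | n + 1, used =>
    [] :: ((List.range 4).filter (fun i => !used.contains i)).flatMap
      (fun i => (pvStrs n (i :: used)).map (fun t => (pvSounds.getD i "").toList ++ t))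

lemma mem_pvStrs_succ (n : Nat) (used : List Nat) (s : List Char) :
    s ∈ pvStrs (n + 1) used ↔
      s = [] ∨ ∃ i, i < 4 ∧ i ∉ used ∧
        ∃ t ∈ pvStrs n (i :: used), s = (pvSounds.getD i "").toList ++ t := by
  simp only [pvStrs, List.mem_cons, List.mem_flatMap, List.mem_filter, List.mem_range,
    List.mem_map]
  constructor
  · rintro (rfl | ⟨i, ⟨hi4, hiu⟩, t, ht, rfl⟩)
    · exact Or.inl rfl
    · exact Or.inr ⟨i, hi4, by simpa using hiu, t, ht, rfl⟩
  · rintro (rfl | ⟨i, hi4, hiu, t, ht, rfl⟩)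
    · exact Or.inl rfl
    · exact Or.inr ⟨i, ⟨hi4, by simpa using hiu⟩, t, ht, rfl⟩

lemma used_full (used : List Nat) (hn : used.Nodup) (h4 : ∀ i ∈ used, i < 4)
    (hl : 4 ≤ used.length) : ∀ i, i < 4 → i ∈ used := by
  intro i hi
  by_contra hmem
  have hnd : (i :: used).Nodup := List.nodup_cons.mpr ⟨hmem, hn⟩
  have hsub : (i :: used).toFinset ⊆ Finset.range 4 := by
    intro x hx
    simp only [List.mem_toFinset, List.mem_cons] at hx
    rcases hx with rfl | hx
    · exact Finset.mem_range.mpr hi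
    · exact Finset.mem_range.mpr (h4 _ hx)
  have hcard : (i :: used).toFinset.card = used.length + 1 := by
    rw [List.toFinset_card_of_nodup hnd]; simp
  have := Finset.card_le_card hsub
  rw [hcard, Finset.card_range] at this
  omega

lemma okB_nil (fuel : Nat) (used : List Nat) (n : Nat)
    (hmem : ([] : List Char) ∈ pvStrs n used) :
    (okB fuel [] used = true) ↔ (([] : List Char) ∈ pvStrs n used ∧ (([] : List Char) = [] → used ≠ [])) := by
  have : okB fuel [] used = decide (0 < used.length) := by cases fuel <;> rfl
  rw [this]
  simp only [decide_eq_true_eq, hmem, true_and]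
  constructor
  · intro h _
    exact List.length_pos_iff.mp h
  · intro h
    exact List.length_pos_iff.mpr (h (by trivial))

lemma okB_correct (fuel : Nat) (s : List Char) (used : List Nat) (n : Nat)
    (hf : s.length ≤ fuel) (hn : used.Nodup) (h4 : ∀ i ∈ used, i < 4)
    (hlen : n = 4 - used.length) :
    (okB fuel s used = true) ↔ (s ∈ pvStrs n used ∧ (s = [] → used ≠ [])) := by
  induction fuel generalizing s used n with
  | zero =>
    have hs : s = [] := List.eq_nil_of_length_eq_zero (Nat.le_zero.mp hf)
    subst hs
    exact okB_nil 0 used n (by cases n <;> simp [pvStrs])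
  | succ fuel ih =>
    cases s with
    | nil => exact okB_nil (fuel + 1) used n (by cases n <;> simp [pvStrs])
    | cons c cs =>
      have hz : ((pvSounds.map String.toList).zipIdx)
          = [("aya".toList, 0), ("ye".toList, 1), ("woo".toList, 2), ("ma".toList, 3)] := by
        decide
      cases n with
      | zero =>
        have hful : 4 ≤ used.length := by omega
        have h0 : 0 ∈ used := used_full used hn h4 hful 0 (by omega)
        have h1 : 1 ∈ used := used_full used hn h4 hful 1 (by omega)
        have h2 : 2 ∈ used := used_full used hn h4 hful 2 (by omega)
        have h3 : 3 ∈ used := used_full used hn h4 hful 3 (by omega)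
        simp [okB, hz, pvStrs, h0, h1, h2, h3]
      | succ m =>
        have hcs : cs.length + 1 ≤ fuel + 1 := by simpa using hf
        have hm : ∀ i : Nat, i ∉ used → m = 4 - (i :: used).length := by
          intro i _; simp; omega
        have key : ∀ (i : Nat) (w : List Char), i < 4 → w = (pvSounds.getD i "").toList →
            ((decide (i ∉ used) && w.isPrefixOf (c :: cs) && okB fuel ((c :: cs).drop w.length) (i :: used)) = true
              ↔ (i ∉ used ∧ ∃ t ∈ pvStrs m (i :: used), (c :: cs) = w ++ t)) := by
          intro i w hi4 hw
          have hwlen : 1 ≤ w.length := by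
            subst hw
            interval_cases i <;> simp [pvSounds]
          constructor
          · rintro h
            simp only [Bool.and_eq_true, decide_eq_true_eq] at h
            obtain ⟨⟨hiu, hpre⟩, hok⟩ := h
            have hprefix : w <+: (c :: cs) := by
              rwa [List.isPrefixOf_iff_prefix] at hpre
            obtain ⟨t, hts⟩ := hprefix
            have hdrop : (c :: cs).drop w.length = t := by
              rw [← hts, List.drop_left]
            rw [hdrop] at hok
            have hL : w.length + t.length = cs.length + 1 := by
              simpa [List.length_append] using congrArg List.length hts
            have hlt : t.length ≤ fuel := by omega
            have := (ih t (i :: used) m hlt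
              (List.nodup_cons.mpr ⟨hiu, hn⟩)
              (by intro x hx; rcases List.mem_cons.mp hx with rfl | hx
                  · exact hi4
                  · exact h4 _ hx)
              (hm i hiu)).mp hok
            exact ⟨hiu, t, this.1, hts.symm⟩
          · rintro ⟨hiu, t, ht, hst⟩
            have hpre : w <+: (c :: cs) := ⟨t, hst.symm⟩
            have hdrop : (c :: cs).drop w.length = t := by
              rw [hst, List.drop_left]
            have hL : w.length + t.length = cs.length + 1 := by
              simpa [List.length_append] using (congrArg List.length hst).symm
            have hlt : t.length ≤ fuel := by omega
            have hok : okB fuel ((c :: cs).drop w.length) (i :: used) = true := by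
              rw [hdrop]
              exact (ih t (i :: used) m hlt
                (List.nodup_cons.mpr ⟨hiu, hn⟩)
                (by intro x hx; rcases List.mem_cons.mp hx with rfl | hx
                    · exact hi4
                    · exact h4 _ hx)
                (hm i hiu)).mpr ⟨ht, by simp⟩
            simp only [Bool.and_eq_true, decide_eq_true_eq]
            exact ⟨⟨hiu, (List.isPrefixOf_iff_prefix).mpr hpre⟩, hok⟩
        rw [mem_pvStrs_succ]
        constructor
        · intro h
          simp only [okB, hz, List.any_cons, List.any_nil, Bool.or_eq_true,
            Bool.or_false] at h
          refine And.intro ?_ (by intro hnil; cases hnil)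
          rcases h with h | h | h | h
          · have := (key 0 ("aya".toList) (by omega) (by simp [pvSounds])).mp h
            exact Or.inr ⟨0, by omega, this.1, this.2⟩
          · have := (key 1 ("ye".toList) (by omega) (by simp [pvSounds])).mp h
            exact Or.inr ⟨1, by omega, this.1, this.2⟩
          · have := (key 2 ("woo".toList) (by omega) (by simp [pvSounds])).mp h
            exact Or.inr ⟨2, by omega, this.1, this.2⟩
          · have := (key 3 ("ma".toList) (by omega) (by simp [pvSounds])).mp h
            exact Or.inr ⟨3, by omega, this.1, this.2⟩
        · rintro ⟨h | ⟨i, hi4, hiu, t, ht, hst⟩, -⟩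
          · cases h
          · simp only [okB, hz, List.any_cons, List.any_nil, Bool.or_eq_true,
              Bool.or_false]
            interval_cases i
            · exact Or.inl ((key 0 ("aya".toList) (by omega) (by simp [pvSounds])).mpr
                ⟨hiu, t, ht, by simpa [pvSounds] using hst⟩)
            · exact Or.inr (Or.inl ((key 1 ("ye".toList) (by omega) (by simp [pvSounds])).mpr
                ⟨hiu, t, ht, by simpa [pvSounds] using hst⟩))
            · exact Or.inr (Or.inr (Or.inl ((key 2 ("woo".toList) (by omega) (by simp [pvSounds])).mpr
                ⟨hiu, t, ht, by simpa [pvSounds] using hst⟩)))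
            · exact Or.inr (Or.inr (Or.inr ((key 3 ("ma".toList) (by omega) (by simp [pvSounds])).mpr
                ⟨hiu, t, ht, by simpa [pvSounds] using hst⟩)))

set_option maxRecDepth 200000 in
lemma babListA_sub : ∀ x ∈ pvBabList.map String.toList,
    x ∈ (pvStrs 4 []).filter (fun t => !t.isEmpty) := by decide

set_option maxRecDepth 200000 in
lemma babListA_sup : ∀ x ∈ (pvStrs 4 []).filter (fun t => !t.isEmpty),
    x ∈ pvBabList.map String.toList := by decide

lemma memA_iff (s : String) :
    s ∈ pvBabList ↔ (s.toList ∈ pvStrs 4 [] ∧ s.toList ≠ []) := by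
  constructor
  · intro hs
    have := babListA_sub s.toList (List.mem_map.mpr ⟨s, hs, rfl⟩)
    rw [List.mem_filter] at this
    exact ⟨this.1, by simpa using this.2⟩
  · rintro ⟨h, hne⟩
    have hf : s.toList ∈ (pvStrs 4 []).filter (fun t => !t.isEmpty) :=
      List.mem_filter.mpr ⟨h, by simpa using hne⟩
    obtain ⟨t, ht, htl⟩ := List.mem_map.mp (babListA_sup _ hf)
    rwa [String.toList_inj.mp htl] at ht

set_option maxRecDepth 200000 in
lemma word_iff (w : String) :
    (decide (w ∈ pvBabList)) = okB w.toList.length w.toList [] := by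
  have h := okB_correct w.toList.length w.toList [] 4 le_rfl List.nodup_nil
    (by intro i hi; simp at hi) (by simp)
  have h' : (okB w.toList.length w.toList [] = true) ↔ w ∈ pvBabList := by
    rw [h, memA_iff]
    constructor
    · rintro ⟨hm, hne⟩
      exact ⟨hm, fun hx => (hne hx) rfl⟩
    · rintro ⟨hm, hne⟩
      exact ⟨hm, fun hx => absurd hx hne⟩
  cases hb : okB w.toList.length w.toList [] with
  | true => exact decide_eq_true (h'.mp hb)
  | false =>
    apply decide_eq_false
    intro hc
    have ht := h'.mpr hc
    rw [hb] at ht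
    exact Bool.false_ne_true ht

lemma count_fold (l : List String) (c : Int) :
    l.foldl (fun acc w => if w ∈ pvBabList then acc + 1 else acc) c
      = c + ((l.countP (fun w => okB w.toList.length w.toList [])) : Int) := by
  induction l generalizing c with
  | nil => simp
  | cons w l ih =>
    rw [List.foldl_cons, List.countP_cons, ih]
    by_cases h : w ∈ pvBabList
    · have hb : okB w.toList.length w.toList [] = true := by
        rw [← word_iff]; exact decide_eq_true h
      rw [if_pos h, hb, if_pos rfl]
      push_cast
      omega
    · have hb : okB w.toList.length w.toList [] = false := by
        rw [← word_iff]; exact decide_eq_false h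
      rw [if_neg h, hb, if_neg (by simp)]
      push_cast
      omega

-- ===== VERDICT (by name: the statement is the Claim_ definition above) =====
theorem solution_spec : Claim_equal_solution := by
  intro babbling _
  unfold Spec_solution solution solution_alt
  rw [PySem.List.foldl_pyRange_zero_pyGetD' babbling ""
    (fun acc w => if w ∈ pvBabList then acc + 1 else acc) 0]
  rw [count_fold]
  simp
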